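-- pv_equiv track=rewrite | github.com/BekaValentine/RetroUI | src/retroui/terminal/screen.py | line_diff
-- ===== SOURCE A (Python) =====
-- from typing import Any, Callable, Generator, List, NewType, Optional, Tuple, Union
--
-- LineDiff = NewType('LineDiff', List[Tuple[int, str]])
--
-- def line_diff(old, new):
--     # type: (str,str) -> LineDiff
--     """
--     Compute the difference between two equal-length lines of text.
--
--     Returns a list of pairs consisting of the starting index of a difference,
--     and the new substring that starts at that index.
--     """
--
--     d = ''
--
--     for i in range(min(len(old), len(new))):
--         if old[i] == new[i]:
--             d += '_'
--         else:
--             d += 'x'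
--
--     j = 0
--     blocks = []
--     while len(d) > j:
--         if d[j] == '_':
--             j += 1
--         elif d[j] == 'x':
--             start = j
--             while len(d) > j and d[j] == 'x':
--                 j += 1
--             end = j
--             blocks.append((start, end))
--
--     ds = [(start, new[start: end]) for (start, end) in blocks]
--
--     if len(old) < len(new):
--         if len(ds) == 0:
--             ds.append((len(old), new[len(old):]))
--         else:
--             x, chg = ds[-1]
--             endx = x + len(chg)
--             if endx == len(old):
--                 ds[-1] = (x, chg + new[len(old):])
--             else:
--                 ds.append((len(old), new[len(old):]))
--
--     return LineDiff(ds)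
-- ===== SOURCE B (Python) =====
-- def line_diff(old, new):
--     # Single pass over new, tracking the start of the current difference run;
--     # positions past the end of old are inherently different.
--     res = []
--     start = None
--     for i in range(len(new)):
--         diff = i >= len(old) or old[i] != new[i]
--         if diff:
--             if start is None:
--                 start = i
--         elif start is not None:
--             res.append((start, new[start:i]))
--             start = None
--     if start is not None:
--         res.append((start, new[start:]))
--     return res
-- ===== Notes on version B (the rewrite author's own statement) =====
-- stated objective: simpler
-- what changed: Replaces A's three phases (build a '_'/'x' marker string, scan it with nested while loops into (start,end) blocks, then a trailing-length merge/append post-processing) by one pass over range(len(new)) that tracks the start of the current difference run, treating positions past the end of old as inherently different; skipping the intermediate marker string also makes it measurably faster.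
import Mathlib
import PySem

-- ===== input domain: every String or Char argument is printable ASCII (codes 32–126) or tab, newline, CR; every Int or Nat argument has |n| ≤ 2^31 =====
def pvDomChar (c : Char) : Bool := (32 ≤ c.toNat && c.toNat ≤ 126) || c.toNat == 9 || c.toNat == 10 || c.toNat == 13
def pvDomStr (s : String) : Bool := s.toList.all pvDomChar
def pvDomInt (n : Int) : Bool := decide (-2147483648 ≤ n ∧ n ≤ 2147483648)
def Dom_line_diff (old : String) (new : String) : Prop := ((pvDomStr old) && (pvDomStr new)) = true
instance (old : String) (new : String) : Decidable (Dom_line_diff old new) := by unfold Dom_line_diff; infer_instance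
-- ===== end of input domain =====

-- B replaces A's marker-string + block-scan + trailing post-processing by a single pass
-- tracking the start of the current difference run (same O(n) cost, simpler decomposition).


-- ===== PORT A =====

-- inner while loop: `while len(d) > j and d[j] == 'x': j += 1` (returns the final j)
def pvScanX (d : List Char) (j : Nat) : Nat :=
  if j < d.length ∧ d.getD j ' ' = 'x' then pvScanX d (j + 1) else j
termination_by d.length - j
decreasing_by omega

-- needed by pvScanBlocks's termination proof
theorem pvScanX_ge (d : List Char) (j : Nat) : j ≤ pvScanX d j := by
  rw [pvScanX]
  split
  · exact Nat.le_trans (Nat.le_succ j) (pvScanX_ge d (j + 1))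
  · exact Nat.le_refl j
termination_by d.length - j
decreasing_by omega

-- outer while loop over j, accumulating `blocks`.  d only ever contains '_' and 'x';
-- on any other character Python's loop would not advance (unreachable), here we stop.
def pvScanBlocks (d : List Char) (j : Nat) (blocks : List (Nat × Nat)) : List (Nat × Nat) :=
  if h : j < d.length then
    if d.getD j ' ' = '_' then pvScanBlocks d (j + 1) blocks
    else if hx : d.getD j ' ' = 'x' then
      pvScanBlocks d (pvScanX d j) (blocks ++ [(j, pvScanX d j)])
    else blocks
  else blocks
termination_by d.length - j
decreasing_by
  · omega
  · have h1 : j + 1 ≤ pvScanX d j := by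
      rw [pvScanX]; simp only [h, hx, and_self, if_true]
      exact pvScanX_ge d (j + 1)
    omega

-- Python slices new[s:e] / new[s:] with 0 ≤ s ≤ e ≤ len(new) are exactly take/drop.
def line_diff (old : String) (new : String) : List (Int × String) :=
  let oldL := old.toList
  let newL := new.toList
  -- d = '' ; for i in range(min(len(old), len(new))): d += '_' or 'x'
  let d : List Char := (List.range (min oldL.length newL.length)).foldl
      (fun acc i => acc ++ [if oldL.getD i ' ' = newL.getD i ' ' then '_' else 'x']) []
  let blocks := pvScanBlocks d 0 []
  let ds : List (Int × String) :=
    blocks.map (fun se => ((se.1 : Int), String.ofList ((newL.drop se.1).take (se.2 - se.1))))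
  if oldL.length < newL.length then
    match ds.getLast? with
    | none => ds ++ [((oldL.length : Int), String.ofList (newL.drop oldL.length))]
    | some (x, chg) =>
      if x + (chg.toList.length : Int) = (oldL.length : Int) then
        ds.dropLast ++ [(x, String.ofList (chg.toList ++ newL.drop oldL.length))]
      else ds ++ [((oldL.length : Int), String.ofList (newL.drop oldL.length))]
  else ds

-- ===== PORT B =====

-- `i >= len(old) or old[i] != new[i]` (short-circuit: old[i] only read when i < len(old))
def pvDiffAt (oldL newL : List Char) (i : Nat) : Bool :=
  decide (oldL.length ≤ i) || decide (¬ oldL.getD i ' ' = newL.getD i ' ')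

-- one iteration of B's loop; state = (res, start)
def pvStep (newL : List Char) (p : Nat → Bool) (st : List (Int × String) × Option Nat)
    (i : Nat) : List (Int × String) × Option Nat :=
  if p i then
    match st.2 with
    | none => (st.1, some i)
    | some _ => st
  else
    match st.2 with
    | none => st
    | some s => (st.1 ++ [((s : Int), String.ofList ((newL.drop s).take (i - s)))], none)

def line_diff_alt (old : String) (new : String) : List (Int × String) :=
  let oldL := old.toList
  let newL := new.toList
  match (List.range newL.length).foldl (pvStep newL (pvDiffAt oldL newL)) ([], none) with
  | (res, none) => res
  | (res, some s) => res ++ [((s : Int), String.ofList (newL.drop s))]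

-- ===== PRECONDITION & SPEC =====
def Spec_line_diff (old : String) (new : String) (out : List (Int × String)) : Prop := out = line_diff_alt old new
instance (old : String) (new : String) (out : List (Int × String)) : Decidable (Spec_line_diff old new out) := by unfold Spec_line_diff; infer_instance

-- ===== CLAIM (what is proved, stated in full; the proofs are below) =====
def Claim_equal_line_diff : Prop := ∀ (old : String) (new : String), Dom_line_diff old new → Spec_line_diff old new (line_diff old new)

-- ===== LEMMAS AND PROOFS =====

-- marker character at position i of the "full-length" marker string
def pvMark (oldL newL : List Char) (i : Nat) : Char :=
  if i < oldL.length ∧ oldL.getD i ' ' = newL.getD i ' ' then '_' else 'x'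

-- blocks → (start, substring) pairs
def pvMapSl (newL : List Char) (bs : List (Nat × Nat)) : List (Int × String) :=
  bs.map (fun se => ((se.1 : Int), String.ofList ((newL.drop se.1).take (se.2 - se.1))))

-- A's trailing post-processing, at the (start, end) block level
def pvPatch (m k : Nat) (bs : List (Nat × Nat)) : List (Nat × Nat) :=
  match bs.getLast? with
  | none => [(m, m + k)]
  | some se => if se.2 = m then bs.dropLast ++ [(se.1, m + k)] else bs ++ [(m, m + k)]

-- one-step unfolding lemmas
theorem pvScanX_step (d : List Char) (j : Nat) (h : j < d.length) (hx : d.getD j ' ' = 'x') :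
    pvScanX d j = pvScanX d (j + 1) := by
  rw [pvScanX, if_pos ⟨h, hx⟩]

theorem pvScanX_stop (d : List Char) (j : Nat) (h : ¬ (j < d.length ∧ d.getD j ' ' = 'x')) :
    pvScanX d j = j := by
  rw [pvScanX, if_neg h]

theorem pvScanBlocks_stop (d : List Char) (j : Nat) (bl : List (Nat × Nat))
    (h : ¬ j < d.length) : pvScanBlocks d j bl = bl := by
  rw [pvScanBlocks, dif_neg h]

theorem pvScanBlocks_us (d : List Char) (j : Nat) (bl : List (Nat × Nat))
    (h : j < d.length) (hu : d.getD j ' ' = '_') :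
    pvScanBlocks d j bl = pvScanBlocks d (j + 1) bl := by
  rw [pvScanBlocks, dif_pos h, if_pos hu]

theorem pvScanBlocks_xs (d : List Char) (j : Nat) (bl : List (Nat × Nat))
    (h : j < d.length) (hx : d.getD j ' ' = 'x') :
    pvScanBlocks d j bl = pvScanBlocks d (pvScanX d j) (bl ++ [(j, pvScanX d j)]) := by
  rw [pvScanBlocks, dif_pos h, if_neg (by rw [hx]; decide), dif_pos hx]

-- scanX bounds
theorem pvScanX_le (d : List Char) (j : Nat) (h : j ≤ d.length) : pvScanX d j ≤ d.length := by
  by_cases hc : j < d.length ∧ d.getD j ' ' = 'x'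
  · rw [pvScanX_step d j hc.1 hc.2]
    exact pvScanX_le d (j + 1) hc.1
  · rw [pvScanX_stop d j hc]; exact h
termination_by d.length - j
decreasing_by omega

theorem pvScanX_gt (d : List Char) (j : Nat) (h : j < d.length) (hx : d.getD j ' ' = 'x') :
    j < pvScanX d j := by
  rw [pvScanX_step d j h hx]
  exact Nat.lt_of_lt_of_le (Nat.lt_succ_self j) (pvScanX_ge d (j + 1))

-- accumulator lemma
theorem pvScanBlocks_acc (d : List Char) (j : Nat) (bl : List (Nat × Nat)) :
    pvScanBlocks d j bl = bl ++ pvScanBlocks d j [] := by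
  by_cases h : j < d.length
  · by_cases hu : d.getD j ' ' = '_'
    · rw [pvScanBlocks_us d j bl h hu, pvScanBlocks_us d j [] h hu]
      exact pvScanBlocks_acc d (j + 1) bl
    · by_cases hx : d.getD j ' ' = 'x'
      · have hgt : j < pvScanX d j := pvScanX_gt d j h hx
        rw [pvScanBlocks_xs d j bl h hx, pvScanBlocks_xs d j [] h hx,
            pvScanBlocks_acc d (pvScanX d j) (bl ++ [(j, pvScanX d j)]),
            pvScanBlocks_acc d (pvScanX d j) ([] ++ [(j, pvScanX d j)])]
        simp
      · rw [pvScanBlocks, dif_pos h, if_neg hu, dif_neg hx,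
            pvScanBlocks, dif_pos h, if_neg hu, dif_neg hx]
        simp
  · rw [pvScanBlocks_stop d j bl h, pvScanBlocks_stop d j [] h]
    simp
termination_by d.length - j
decreasing_by all_goals omega

-- scanX on d ++ 'x'^k
theorem pvScanX_append_right (d : List Char) (k j : Nat) (h1 : d.length ≤ j)
    (h2 : j ≤ d.length + k) :
    pvScanX (d ++ List.replicate k 'x') j = d.length + k := by
  by_cases hj : j < d.length + k
  · have hget : (d ++ List.replicate k 'x').getD j ' ' = 'x' := by
      rw [List.getD_append_right d _ ' ' j h1]
      exact List.getD_replicate 'x' (by omega)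
    have hlen : j < (d ++ List.replicate k 'x').length := by simp; omega
    rw [pvScanX_step _ j hlen hget]
    exact pvScanX_append_right d k (j + 1) (by omega) (by omega)
  · have hje : j = d.length + k := by omega
    rw [pvScanX_stop _ j (by simp; omega)]
    exact hje
termination_by d.length + k - j
decreasing_by omega

theorem pvScanX_append (d : List Char) (k j : Nat) (h : j ≤ d.length) :
    pvScanX (d ++ List.replicate k 'x') j =
      if pvScanX d j < d.length then pvScanX d j else d.length + k := by
  by_cases hj : j < d.length
  · by_cases hx : d.getD j ' ' = 'x'
    · have hget : (d ++ List.replicate k 'x').getD j ' ' = 'x' := by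
        rw [List.getD_append d _ ' ' j hj]; exact hx
      have hlen : j < (d ++ List.replicate k 'x').length := by simp; omega
      rw [pvScanX_step d j hj hx, pvScanX_step _ j hlen hget]
      exact pvScanX_append d k (j + 1) (by omega)
    · have hget : (d ++ List.replicate k 'x').getD j ' ' = d.getD j ' ' :=
        List.getD_append d _ ' ' j hj
      have hstop : pvScanX d j = j := pvScanX_stop d j (by intro hc; exact hx hc.2)
      rw [pvScanX_stop _ j (by intro hc; exact hx (hget ▸ hc.2)), hstop, if_pos hj]
  · have hjl : j = d.length := by omega
    have hstop : pvScanX d j = j := pvScanX_stop d j (by omega)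
    rw [hstop, if_neg (by omega), pvScanX_append_right d k j (by omega) (by omega)]
termination_by d.length - j
decreasing_by omega

-- block invariant
theorem pvScanBlocks_mem (d : List Char) (j : Nat) (s e : Nat)
    (hmem : (s, e) ∈ pvScanBlocks d j []) : j ≤ s ∧ s < e ∧ e ≤ d.length := by
  by_cases h : j < d.length
  · by_cases hu : d.getD j ' ' = '_'
    · rw [pvScanBlocks_us d j [] h hu] at hmem
      have := pvScanBlocks_mem d (j + 1) s e hmem
      omega
    · by_cases hx : d.getD j ' ' = 'x'
      · have hgt : j < pvScanX d j := pvScanX_gt d j h hx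
        have hle : pvScanX d j ≤ d.length := pvScanX_le d j (by omega)
        rw [pvScanBlocks_xs d j [] h hx, pvScanBlocks_acc] at hmem
        simp only [List.nil_append, List.mem_append, List.mem_singleton,
          Prod.mk.injEq] at hmem
        rcases hmem with hmem | hmem
        · omega
        · have := pvScanBlocks_mem d (pvScanX d j) s e hmem
          omega
      · rw [pvScanBlocks, dif_pos h, if_neg hu, dif_neg hx] at hmem
        simp at hmem
  · rw [pvScanBlocks_stop d j [] h] at hmem
    simp at hmem
termination_by d.length - j
decreasing_by all_goals omega

theorem pvPatch_cons (m k : Nat) (b : Nat × Nat) (bs : List (Nat × Nat)) (h : bs ≠ []) :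
    pvPatch m k (b :: bs) = b :: pvPatch m k bs := by
  cases bs with
  | nil => exact absurd rfl h
  | cons b' t =>
    simp only [pvPatch, List.getLast?_cons_cons]
    cases hgl : (b' :: t).getLast? with
    | none => exact absurd hgl (by simp)
    | some a =>
      by_cases hcond : a.2 = m <;> simp [hcond]

-- appending k ≥ 1 'x's to the marker string = A's trailing post-processing
theorem pvScanBlocks_append (d : List Char) (k : Nat) (hk : 0 < k)
    (hc : ∀ i, i < d.length → d.getD i ' ' = '_' ∨ d.getD i ' ' = 'x')
    (j : Nat) (hj : j ≤ d.length) :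
    pvScanBlocks (d ++ List.replicate k 'x') j [] = pvPatch d.length k (pvScanBlocks d j []) := by
  by_cases h : j < d.length
  · rcases hc j h with hu | hx
    · have hu' : (d ++ List.replicate k 'x').getD j ' ' = '_' := by
        rw [List.getD_append d _ ' ' j h]; exact hu
      rw [pvScanBlocks_us _ j [] (by simp; omega) hu', pvScanBlocks_us d j [] h hu]
      exact pvScanBlocks_append d k hk hc (j + 1) (by omega)
    · have hgt : j < pvScanX d j := pvScanX_gt d j h hx
      have hle : pvScanX d j ≤ d.length := pvScanX_le d j (by omega)
      have hx' : (d ++ List.replicate k 'x').getD j ' ' = 'x' := by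
        rw [List.getD_append d _ ' ' j h]; exact hx
      have hlen' : j < (d ++ List.replicate k 'x').length := by simp; omega
      rw [pvScanBlocks_xs _ j [] hlen' hx', pvScanBlocks_acc _ (pvScanX (d ++ List.replicate k 'x') j),
          pvScanBlocks_xs d j [] h hx, pvScanBlocks_acc d (pvScanX d j),
          pvScanX_append d k j (by omega)]
      by_cases he : pvScanX d j < d.length
      · rw [if_pos he, pvScanBlocks_append d k hk hc (pvScanX d j) (by omega)]
        cases hR : pvScanBlocks d (pvScanX d j) [] with
        | nil =>
          simp [pvPatch, Nat.ne_of_lt he]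
        | cons b t =>
          simp only [List.nil_append, List.singleton_append]
          rw [pvPatch_cons d.length k (j, pvScanX d j) (b :: t) (by simp)]
      · rw [if_neg he]
        have he' : pvScanX d j = d.length := by omega
        rw [he', pvScanBlocks_stop d d.length [] (by omega),
            pvScanBlocks_stop _ (d.length + k) [] (by simp)]
        simp [pvPatch]
  · have hjm : j = d.length := by omega
    rw [pvScanBlocks_stop d j [] (by omega)]
    have hx' : (d ++ List.replicate k 'x').getD j ' ' = 'x' := by
      rw [hjm, List.getD_append_right d _ ' ' _ (le_refl _), Nat.sub_self]
      exact List.getD_replicate 'x' (by omega)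
    have hlen' : j < (d ++ List.replicate k 'x').length := by simp; omega
    rw [pvScanBlocks_xs _ j [] hlen' hx',
        pvScanX_append_right d k j (by omega) (by omega),
        pvScanBlocks_stop _ (d.length + k) _ (by simp), hjm]
    simp [pvPatch]
termination_by d.length - j
decreasing_by all_goals omega

-- closing B's final open run
def pvClose (newL : List Char) : List (Int × String) × Option Nat → List (Int × String)
  | (res, none) => res
  | (res, some s) => res ++ [((s : Int), String.ofList (newL.drop s))]

-- B's fold = blocks of the marker string (P/Q loop invariant, induction on n - j)
theorem pvFoldPQ (newL : List Char) (p : Nat → Bool) (d : List Char)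
    (hn : d.length = newL.length)
    (hp : ∀ i, i < d.length → (p i = true ↔ d.getD i ' ' = 'x'))
    (hc : ∀ i, i < d.length → d.getD i ' ' = '_' ∨ d.getD i ' ' = 'x')
    (j : Nat) :
    (∀ res, pvClose newL ((List.range' j (newL.length - j)).foldl (pvStep newL p) (res, none))
        = res ++ pvMapSl newL (pvScanBlocks d j [])) ∧
    (∀ res s, pvClose newL ((List.range' j (newL.length - j)).foldl (pvStep newL p) (res, some s))
        = res ++ [((s : Int), String.ofList ((newL.drop s).take (pvScanX d j - s)))]
            ++ pvMapSl newL (pvScanBlocks d (pvScanX d j) [])) := by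
  by_cases hend : newL.length ≤ j
  · have h0 : newL.length - j = 0 := by omega
    have hstop : ¬ j < d.length := by omega
    constructor
    · intro res
      rw [h0, List.range'_zero, List.foldl_nil, pvScanBlocks_stop d j [] hstop]
      simp [pvClose, pvMapSl]
    · intro res s
      rw [h0, List.range'_zero, List.foldl_nil,
          pvScanX_stop d j (by intro hcon; omega),
          pvScanBlocks_stop d j [] hstop]
      have htake : (newL.drop s).take (j - s) = newL.drop s :=
        List.take_of_length_le (by rw [List.length_drop]; omega)
      simp [pvClose, pvMapSl, htake]
  · have hj : j < newL.length := by omega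
    have hjd : j < d.length := by omega
    have hrange : List.range' j (newL.length - j)
        = j :: List.range' (j + 1) (newL.length - (j + 1)) := by
      have : newL.length - j = (newL.length - (j + 1)) + 1 := by omega
      rw [this, List.range'_succ]
    have IH := pvFoldPQ newL p d hn hp hc (j + 1)
    by_cases hpj : p j = true
    · have hx : d.getD j ' ' = 'x' := (hp j hjd).mp hpj
      have hsx : pvScanX d j = pvScanX d (j + 1) := pvScanX_step d j hjd hx
      constructor
      · intro res
        rw [hrange, List.foldl_cons]
        have hstep : pvStep newL p (res, none) j = (res, some j) := by
          simp [pvStep, hpj]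
        rw [hstep, IH.2 res j,
            pvScanBlocks_xs d j [] hjd hx, pvScanBlocks_acc d (pvScanX d j), hsx]
        simp [pvMapSl]
      · intro res s
        rw [hrange, List.foldl_cons]
        have hstep : pvStep newL p (res, some s) j = (res, some s) := by
          simp [pvStep, hpj]
        rw [hstep, IH.2 res s, hsx]
    · have hnx : ¬ d.getD j ' ' = 'x' := fun hcon => hpj ((hp j hjd).mpr hcon)
      have hu : d.getD j ' ' = '_' := (hc j hjd).resolve_right hnx
      have hsx : pvScanX d j = j := pvScanX_stop d j (fun hcon => hnx hcon.2)
      constructor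
      · intro res
        rw [hrange, List.foldl_cons]
        have hstep : pvStep newL p (res, none) j = (res, none) := by
          simp [pvStep, hpj]
        rw [hstep, IH.1 res, pvScanBlocks_us d j [] hjd hu]
      · intro res s
        rw [hrange, List.foldl_cons]
        have hstep : pvStep newL p (res, some s) j
            = (res ++ [((s : Int), String.ofList ((newL.drop s).take (j - s)))], none) := by
          simp [pvStep, hpj]
        rw [hstep, IH.1, hsx, pvScanBlocks_us d j [] hjd hu]
termination_by newL.length - j
decreasing_by all_goals omega

-- B in terms of the full-length marker string
theorem pvAlt_eq (old new : String) :
    line_diff_alt old new =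
      pvMapSl new.toList
        (pvScanBlocks ((List.range new.toList.length).map (pvMark old.toList new.toList)) 0 []) := by
  have hmatch : line_diff_alt old new
      = pvClose new.toList ((List.range new.toList.length).foldl
          (pvStep new.toList (pvDiffAt old.toList new.toList)) ([], none)) := by
    rcases hfl : (List.range new.toList.length).foldl
        (pvStep new.toList (pvDiffAt old.toList new.toList)) ([], none) with ⟨res, _ | s⟩ <;>
      simp only [line_diff_alt, pvClose, hfl]
  rw [hmatch]
  have hlen : ((List.range new.toList.length).map (pvMark old.toList new.toList)).length
      = new.toList.length := by simp
  have hp : ∀ i, i < ((List.range new.toList.length).map (pvMark old.toList new.toList)).length →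
      (pvDiffAt old.toList new.toList i = true ↔
        ((List.range new.toList.length).map (pvMark old.toList new.toList)).getD i ' ' = 'x') := by
    intro i hi
    rw [hlen] at hi
    rw [PySem.List.getD_map_range _ _ _ ' ' hi]
    simp only [pvDiffAt, pvMark]
    by_cases h1 : i < old.toList.length ∧ old.toList.getD i ' ' = new.toList.getD i ' '
    · rw [if_pos h1]
      refine iff_of_false ?_ (by decide)
      simp only [Bool.or_eq_true, decide_eq_true_eq, not_or]
      exact ⟨by omega, fun hcon => hcon h1.2⟩
    · rw [if_neg h1]
      refine iff_of_true ?_ rfl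
      simp only [Bool.or_eq_true, decide_eq_true_eq]
      by_cases h2 : old.toList.length ≤ i
      · exact Or.inl h2
      · exact Or.inr fun hcon => h1 ⟨by omega, hcon⟩
  have hc : ∀ i, i < ((List.range new.toList.length).map (pvMark old.toList new.toList)).length →
      ((List.range new.toList.length).map (pvMark old.toList new.toList)).getD i ' ' = '_' ∨
      ((List.range new.toList.length).map (pvMark old.toList new.toList)).getD i ' ' = 'x' := by
    intro i hi
    rw [hlen] at hi
    rw [PySem.List.getD_map_range _ _ _ ' ' hi]
    unfold pvMark
    split
    · left; rfl
    · right; rfl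
  have hP := (pvFoldPQ new.toList (pvDiffAt old.toList new.toList)
      ((List.range new.toList.length).map (pvMark old.toList new.toList)) hlen hp hc 0).1 []
  rw [Nat.sub_zero, ← List.range_eq_range'] at hP
  rw [hP, List.nil_append]

-- A in terms of the min-length marker string
theorem pvA_marker (old new : String) :
    (List.range (min old.toList.length new.toList.length)).foldl
        (fun acc i => acc ++ [if old.toList.getD i ' ' = new.toList.getD i ' ' then '_' else 'x']) []
      = (List.range (min old.toList.length new.toList.length)).map (pvMark old.toList new.toList) := by
  rw [PySem.List.foldl_append_singleton_eq_map]
  refine List.map_congr_left ?_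
  intro i hi
  rw [List.mem_range] at hi
  unfold pvMark
  by_cases heq : old.toList.getD i ' ' = new.toList.getD i ' '
  · rw [if_pos heq, if_pos ⟨by omega, heq⟩]
  · rw [if_neg heq, if_neg (by intro hcon; exact heq hcon.2)]

-- A's string-level trailing post-processing, as a function
def pvPatchS (newL : List Char) (m : Nat) (ds : List (Int × String)) : List (Int × String) :=
  match ds.getLast? with
  | none => ds ++ [((m : Int), String.ofList (newL.drop m))]
  | some (x, chg) =>
    if x + (chg.toList.length : Int) = (m : Int) then
      ds.dropLast ++ [(x, String.ofList (chg.toList ++ newL.drop m))]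
    else ds ++ [((m : Int), String.ofList (newL.drop m))]

-- string-level patch commutes with pvMapSl
theorem pvPatch_mapSl (newL : List Char) (m : Nat) (hmn : m < newL.length)
    (bs : List (Nat × Nat)) (hinv : ∀ s e, (s, e) ∈ bs → s < e ∧ e ≤ m) :
    pvPatchS newL m (pvMapSl newL bs) = pvMapSl newL (pvPatch m (newL.length - m) bs) := by
  rcases List.eq_nil_or_concat bs with rfl | ⟨l, ⟨s, e⟩, rfl⟩
  · have htake : (newL.drop m).take (newL.length - m) = newL.drop m :=
      List.take_of_length_le (by rw [List.length_drop])
    have harith : m + (newL.length - m) - m = newL.length - m := by omega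
    simp [pvPatchS, pvPatch, pvMapSl, harith, htake]
  · rw [List.concat_eq_append] at hinv ⊢
    have hse : s < e ∧ e ≤ m := hinv s e (by simp)
    have hchg : (String.ofList ((newL.drop s).take (e - s))).toList.length = e - s := by
      rw [String.toList_ofList, List.length_take, List.length_drop]
      omega
    have hmap : pvMapSl newL (l ++ [(s, e)])
        = pvMapSl newL l ++ [((s : Int), String.ofList ((newL.drop s).take (e - s)))] := by
      simp [pvMapSl]
    have hpatch : pvPatch m (newL.length - m) (l ++ [(s, e)])
        = if e = m then l ++ [(s, m + (newL.length - m))]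
          else (l ++ [(s, e)]) ++ [(m, m + (newL.length - m))] := by
      simp [pvPatch]
    have hPS : pvPatchS newL m
          (pvMapSl newL l ++ [((s : Int), String.ofList ((newL.drop s).take (e - s)))])
        = if (s : Int) + ((String.ofList ((newL.drop s).take (e - s))).toList.length : Int) = (m : Int)
          then (pvMapSl newL l
                ++ [((s : Int), String.ofList ((newL.drop s).take (e - s)))]).dropLast
              ++ [((s : Int), String.ofList
                    ((String.ofList ((newL.drop s).take (e - s))).toList ++ newL.drop m))]
          else (pvMapSl newL l ++ [((s : Int), String.ofList ((newL.drop s).take (e - s)))])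
              ++ [((m : Int), String.ofList (newL.drop m))] := by
      simp [pvPatchS]
    rw [hmap, hPS, hchg, hpatch]
    by_cases hem : e = m
    · rw [if_pos (by omega), if_pos hem, List.dropLast_concat]
      have h2 : newL.drop m = (newL.drop s).drop (e - s) := by
        rw [List.drop_drop]
        congr 1
        omega
      have hval : (newL.drop s).take (e - s) ++ newL.drop m
          = (newL.drop s).take (m + (newL.length - m) - s) := by
        rw [h2, List.take_append_drop,
            List.take_of_length_le (by rw [List.length_drop]; omega)]
      simp only [pvMapSl, List.map_append, List.map_cons, List.map_nil]
      rw [String.toList_ofList, hval]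
    · rw [if_neg (by omega), if_neg hem]
      have htake : (newL.drop m).take (newL.length - m) = newL.drop m :=
        List.take_of_length_le (by rw [List.length_drop])
      simp [pvMapSl]
      rw [htake]

theorem pv_main (old new : String) : line_diff old new = line_diff_alt old new := by
  rw [pvAlt_eq]
  unfold line_diff
  simp only [pvA_marker]
  by_cases hmn : old.toList.length < new.toList.length
  · rw [if_pos hmn]
    have hμ : min old.toList.length new.toList.length = old.toList.length := by omega
    rw [hμ]
    have hlen : ((List.range old.toList.length).map (pvMark old.toList new.toList)).length
        = old.toList.length := by simp
    have hc : ∀ i, i < ((List.range old.toList.length).map (pvMark old.toList new.toList)).length →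
        ((List.range old.toList.length).map (pvMark old.toList new.toList)).getD i ' ' = '_' ∨
        ((List.range old.toList.length).map (pvMark old.toList new.toList)).getD i ' ' = 'x' := by
      intro i hi
      rw [hlen] at hi
      rw [PySem.List.getD_map_range _ _ _ ' ' hi]
      unfold pvMark
      split
      · left; rfl
      · right; rfl
    have hsplit : (List.range new.toList.length).map (pvMark old.toList new.toList)
        = (List.range old.toList.length).map (pvMark old.toList new.toList)
          ++ List.replicate (new.toList.length - old.toList.length) 'x' := by
      have hnm : new.toList.length
          = old.toList.length + (new.toList.length - old.toList.length) := by omega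
      conv_lhs => rw [hnm]
      rw [List.range_add, List.map_append, List.map_map]
      congr 1
      rw [List.map_congr_left
          (g := fun _ => 'x') (fun i _ => by
            show pvMark old.toList new.toList (old.toList.length + i) = 'x'
            exact if_neg fun hcon => absurd hcon.1 (by omega)),
          List.map_const', List.length_range]
    rw [hsplit, pvScanBlocks_append _ _ (by omega) hc 0 (by omega), hlen]
    have hinv : ∀ s e, (s, e) ∈ pvScanBlocks
          ((List.range old.toList.length).map (pvMark old.toList new.toList)) 0 [] →
        s < e ∧ e ≤ old.toList.length := by
      intro s e hm2
      have h3 := pvScanBlocks_mem _ 0 s e hm2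
      rw [hlen] at h3
      exact ⟨h3.2.1, h3.2.2⟩
    rw [← pvPatch_mapSl new.toList old.toList.length hmn _ hinv]
    rfl
  · rw [if_neg hmn]
    have hμ : min old.toList.length new.toList.length = new.toList.length := by omega
    rw [hμ]
    rfl

-- ===== VERDICT (by name: the statement is the Claim_ definition above) =====
theorem line_diff_spec : Claim_equal_line_diff := by
  intro old new _
  unfold Spec_line_diff
  exact pv_main old new
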